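-- pv_equiv track=rewrite | github.com/poig/self-research | Quantum_sat/tests/qlto_fpt_solver_conservative.py | parse_dimacs_cnf
-- ===== SOURCE A (Python) =====
-- from typing import List, Tuple, Dict, Optional
--
-- def parse_dimacs_cnf(file_content: str) -> Tuple[List[Tuple[int, ...]], int]:
--     clauses = []
--     n_vars = 0
--     current_clause = []
--     for line in file_content.splitlines():
--         line = line.strip()
--         if not line or line.startswith('c'):
--             continue
--         if line.startswith('p cnf'):
--             parts = line.split()
--             try:
--                 n_vars = int(parts[2])
--             except Exception:
--                 pass
--             continue
--         # normalize
--         line = line.replace('.', ' ')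
--         tokens = line.split()
--         try:
--             lits = [int(x) for x in tokens]
--         except Exception:
--             continue
--         for lit in lits:
--             if lit == 0:
--                 if current_clause:
--                     clauses.append(tuple(current_clause))
--                 current_clause = []
--             else:
--                 current_clause.append(lit)
--     if current_clause:
--         clauses.append(tuple(current_clause))
--     return clauses, n_vars
-- ===== SOURCE B (Python) =====
-- def parse_dimacs_cnf(file_content):
--     # Pass 1: parse the header and collect every literal into one flat list.
--     n_vars = 0
--     all_lits = []
--     for raw in file_content.splitlines():
--         line = raw.strip()
--         if not line or line.startswith('c'):
--             continue
--         if line.startswith('p cnf'):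
--             parts = line.split()
--             try:
--                 n_vars = int(parts[2])
--             except Exception:
--                 pass
--             continue
--         try:
--             all_lits += [int(t) for t in line.replace('.', ' ').split()]
--         except Exception:
--             continue
--     # Pass 2: split the flat literal stream on zeros into clause tuples.
--     clauses = []
--     group = []
--     for lit in all_lits:
--         if lit == 0:
--             if group:
--                 clauses.append(tuple(group))
--             group = []
--         else:
--             group.append(lit)
--     if group:
--         clauses.append(tuple(group))
--     return clauses, n_vars
-- ===== Notes on version B (the rewrite author's own statement) =====
-- stated objective: alternative
-- what changed: A builds clauses while parsing, threading (clauses, current_clause) state across lines; B is decomposed into two independent passes: first collect the header count and one flat literal list, then split that list on zeros into clause tuples.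
import Mathlib
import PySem

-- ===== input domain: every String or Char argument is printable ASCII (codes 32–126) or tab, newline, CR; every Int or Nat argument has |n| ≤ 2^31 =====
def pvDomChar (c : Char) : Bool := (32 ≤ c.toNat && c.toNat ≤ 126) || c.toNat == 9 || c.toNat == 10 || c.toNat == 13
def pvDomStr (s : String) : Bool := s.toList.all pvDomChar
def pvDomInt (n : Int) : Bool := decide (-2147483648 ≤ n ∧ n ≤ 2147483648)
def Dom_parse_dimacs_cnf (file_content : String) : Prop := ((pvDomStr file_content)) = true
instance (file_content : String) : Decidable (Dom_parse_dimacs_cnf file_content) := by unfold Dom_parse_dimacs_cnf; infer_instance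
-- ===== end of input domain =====

-- B re-decomposes A's single interleaved loop into two passes (collect a flat literal list, then
-- split it on zeros); same results, alternative structure.

-- ===== PORT A =====
-- A's inner 'for lit in lits' body
def pvStepLitA (st : List (List Int) × List Int) (lit : Int) : List (List Int) × List Int :=
  if lit = 0 then (if st.2 ≠ [] then st.1 ++ [st.2] else st.1, [])
  else (st.1, st.2 ++ [lit])

-- A's 'for line in file_content.splitlines()' body; state = (clauses, n_vars, current_clause)
def pvLineA (st : List (List Int) × Int × List Int) (raw : String) :
    List (List Int) × Int × List Int :=
  -- 'line = line.strip()' is inlined as 'PySem.Str.strip raw' at each use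
  if (PySem.Str.strip raw == "") || PySem.Str.startswith (PySem.Str.strip raw) "c" then st
  else if PySem.Str.startswith (PySem.Str.strip raw) "p cnf" then
    match PySem.List.pyGet? (PySem.Str.split₀ (PySem.Str.strip raw)) 2 with
    | none => st                      -- IndexError caught: pass
    | some p =>
      match PySem.Int.ofStr? p with
      | none => st                    -- ValueError caught: pass
      | some v => (st.1, v, st.2.2)
  else
    match (PySem.Str.split₀ (PySem.Str.replace (PySem.Str.strip raw) "." " ")).mapM PySem.Int.ofStr? with
    | none => st                      -- ValueError caught: continue
    | some lits =>
      ((lits.foldl pvStepLitA (st.1, st.2.2)).1, st.2.1, (lits.foldl pvStepLitA (st.1, st.2.2)).2)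

def pvFinishA (st : List (List Int) × Int × List Int) : List (List Int) × Int :=
  ((if st.2.2 ≠ [] then st.1 ++ [st.2.2] else st.1), st.2.1)

def parse_dimacs_cnf (file_content : String) : List (List Int) × Int :=
  pvFinishA ((PySem.Str.splitlines file_content).foldl pvLineA ([], 0, []))

-- ===== PORT B =====
-- B's pass-1 body; state = (all_lits, n_vars)
def pvLineB (st : List Int × Int) (raw : String) : List Int × Int :=
  -- 'line = line.strip()' is inlined as 'PySem.Str.strip raw' at each use
  if (PySem.Str.strip raw == "") || PySem.Str.startswith (PySem.Str.strip raw) "c" then st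
  else if PySem.Str.startswith (PySem.Str.strip raw) "p cnf" then
    match PySem.List.pyGet? (PySem.Str.split₀ (PySem.Str.strip raw)) 2 with
    | none => st
    | some p =>
      match PySem.Int.ofStr? p with
      | none => st
      | some v => (st.1, v)
  else
    match (PySem.Str.split₀ (PySem.Str.replace (PySem.Str.strip raw) "." " ")).mapM PySem.Int.ofStr? with
    | none => st
    | some lits => (st.1 ++ lits, st.2)

-- B's pass-2 body; state = (clauses, group)
def pvStepZero (st : List (List Int) × List Int) (lit : Int) : List (List Int) × List Int :=
  if lit = 0 then (if st.2 ≠ [] then st.1 ++ [st.2] else st.1, [])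
  else (st.1, st.2 ++ [lit])

def pvFinishB (p1 : List Int × Int) : List (List Int) × Int :=
  (((if (p1.1.foldl pvStepZero ([], [])).2 ≠ [] then
      (p1.1.foldl pvStepZero ([], [])).1 ++ [(p1.1.foldl pvStepZero ([], [])).2]
    else (p1.1.foldl pvStepZero ([], [])).1)), p1.2)

def parse_dimacs_cnf_alt (file_content : String) : List (List Int) × Int :=
  pvFinishB ((PySem.Str.splitlines file_content).foldl pvLineB ([], 0))

-- ===== PRECONDITION & SPEC =====
def Spec_parse_dimacs_cnf (file_content : String) (out : List (List Int) × Int) : Prop := out = parse_dimacs_cnf_alt file_content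
instance (file_content : String) (out : List (List Int) × Int) : Decidable (Spec_parse_dimacs_cnf file_content out) := by unfold Spec_parse_dimacs_cnf; infer_instance

-- ===== CLAIM (what is proved, stated in full; the proofs are below) =====
def Claim_equal_parse_dimacs_cnf : Prop := ∀ (file_content : String), Dom_parse_dimacs_cnf file_content → Spec_parse_dimacs_cnf file_content (parse_dimacs_cnf file_content)

-- ===== LEMMAS AND PROOFS =====

theorem stepEq : pvStepLitA = pvStepZero := rfl

-- pvLineB is accumulator-homomorphic in its literal list
theorem lineB_acc (raw : String) (acc : List Int) (nv : Int) :
    pvLineB (acc, nv) raw = (acc ++ (pvLineB ([], nv) raw).1, (pvLineB ([], nv) raw).2) := by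
  unfold pvLineB
  split_ifs with h1 h2
  · simp
  · cases hp : PySem.List.pyGet? (PySem.Str.split₀ (PySem.Str.strip raw)) 2 with
    | none => simp
    | some p => cases hv : PySem.Int.ofStr? p <;> simp [hv]
  · cases hl : (PySem.Str.split₀ (PySem.Str.replace (PySem.Str.strip raw) "." " ")).mapM PySem.Int.ofStr? <;> simp

theorem foldB_acc (ls : List String) (acc : List Int) (nv : Int) :
    ls.foldl pvLineB (acc, nv)
      = (acc ++ (ls.foldl pvLineB ([], nv)).1, (ls.foldl pvLineB ([], nv)).2) := by
  induction ls generalizing acc nv with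
  | nil => simp
  | cons l ls ih =>
    simp only [List.foldl_cons]
    rw [lineB_acc l acc nv]
    rcases hb : pvLineB ([], nv) l with ⟨b1, nv1⟩
    rw [ih (acc ++ b1) nv1, ih b1 nv1]
    simp

-- one line of A = pass-1 line of B followed by zero-splitting of the new literals
theorem lineAB (raw : String) (cls : List (List Int)) (nv : Int) (cur : List Int) :
    pvLineA (cls, nv, cur) raw
      = (((pvLineB ([], nv) raw).1.foldl pvStepZero (cls, cur)).1,
         (pvLineB ([], nv) raw).2,
         ((pvLineB ([], nv) raw).1.foldl pvStepZero (cls, cur)).2) := by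
  unfold pvLineA pvLineB
  split_ifs with h1 h2
  · simp
  · cases hp : PySem.List.pyGet? (PySem.Str.split₀ (PySem.Str.strip raw)) 2 with
    | none => simp
    | some p => cases hv : PySem.Int.ofStr? p <;> simp [hv]
  · cases hl : (PySem.Str.split₀ (PySem.Str.replace (PySem.Str.strip raw) "." " ")).mapM PySem.Int.ofStr? with
    | none => simp
    | some lits => simp [stepEq]

theorem key (ls : List String) (cls : List (List Int)) (nv : Int) (cur : List Int) :
    ls.foldl pvLineA (cls, nv, cur)
      = (((ls.foldl pvLineB ([], nv)).1.foldl pvStepZero (cls, cur)).1,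
         (ls.foldl pvLineB ([], nv)).2,
         ((ls.foldl pvLineB ([], nv)).1.foldl pvStepZero (cls, cur)).2) := by
  induction ls generalizing cls nv cur with
  | nil => simp
  | cons l ls ih =>
    simp only [List.foldl_cons]
    rw [lineAB l cls nv cur]
    rcases hb : pvLineB ([], nv) l with ⟨b1, nv1⟩
    rw [ih, foldB_acc ls b1 nv1]
    simp [List.foldl_append]

-- ===== VERDICT (by name: the statement is the Claim_ definition above) =====
theorem parse_dimacs_cnf_spec : Claim_equal_parse_dimacs_cnf := by
  intro fc _
  unfold Spec_parse_dimacs_cnf parse_dimacs_cnf parse_dimacs_cnf_alt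
  rw [key]
  rfl
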